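-- pv_equiv track=rewrite | github.com/ayhamgheis/RINEX-Conversion-Utility | V1/src/build/disolve.py | get_sv_list
-- ===== SOURCE A (Python) =====
-- def get_sv_list(Log, lines_sv: list):
--     ''' creates a list of the sv's from this epoch '''
--     # process the lines
--     lines = ''.join(list(filter(None, (''.join(lines_sv).split(' ')))))
--     sv = ''
--     sv_list = list()
--     for char in lines:
--         if char.isalpha():
--             if len(sv) == 3:
--                 sv_list.append(sv)
--             sv = ''
--         sv += char
--     sv_list.append(sv)
--     return sv_list
-- ===== SOURCE B (Python) =====
-- def get_sv_list(Log, lines_sv: list):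
--     ''' creates a list of the sv's from this epoch '''
--     # position-based: find the alpha cut positions, slice the string between consecutive cuts
--     s = ''.join(ch for ch in ''.join(lines_sv) if ch != ' ')
--     cuts = [0] + [i for i, ch in enumerate(s) if ch.isalpha()] + [len(s)]
--     tokens = [s[a:b] for a, b in zip(cuts, cuts[1:])]
--     return [t for t in tokens[:-1] if len(t) == 3] + [tokens[-1]]
-- ===== Notes on version B (the rewrite author's own statement) =====
-- stated objective: alternative
-- what changed: B replaces A's character-by-character accumulator scan with a position-based algorithm: it computes the list of indices of alphabetic characters as cut positions, slices the space-stripped string between consecutive cuts to obtain the tokens, and then filters length-3 tokens before the last.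
import Mathlib
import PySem

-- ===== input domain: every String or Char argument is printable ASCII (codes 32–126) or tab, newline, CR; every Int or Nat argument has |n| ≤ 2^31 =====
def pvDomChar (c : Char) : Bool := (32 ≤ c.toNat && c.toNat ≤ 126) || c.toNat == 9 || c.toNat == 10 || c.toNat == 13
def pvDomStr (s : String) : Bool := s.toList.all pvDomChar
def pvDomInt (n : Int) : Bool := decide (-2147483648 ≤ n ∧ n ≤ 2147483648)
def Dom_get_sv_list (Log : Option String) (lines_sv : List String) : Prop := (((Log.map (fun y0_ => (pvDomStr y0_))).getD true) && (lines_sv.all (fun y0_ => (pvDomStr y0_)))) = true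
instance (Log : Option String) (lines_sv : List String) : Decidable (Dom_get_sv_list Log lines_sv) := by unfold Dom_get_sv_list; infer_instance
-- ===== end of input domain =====

-- B replaces A's character-by-character accumulator scan with a position-based algorithm:
-- alpha indices are cut positions, tokens are the slices between consecutive cuts.
-- ===== PORT A =====
-- lines = ''.join(list(filter(None, (''.join(lines_sv).split(' ')))))
-- loop: flush-on-alpha accumulator
def get_sv_list (Log : Option String) (lines_sv : List String) : List String :=
  let joined : List Char := PySem.Chars.join [] (lines_sv.map String.toList)
  let lines : List Char :=
    PySem.Chars.join [] ((PySem.Chars.splitOn joined [' ']).filter (fun p => !p.isEmpty))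
  let st : List Char × List (List Char) :=
    lines.foldl (fun st char =>
      if PySem.Chars.isalpha char then
        ([char], if st.1.length == 3 then st.2 ++ [st.1] else st.2)
      else
        (st.1 ++ [char], st.2)) ([], [])
  (st.2 ++ [st.1]).map String.ofList

-- ===== PORT B =====
-- s = ''.join(ch for ch in ''.join(lines_sv) if ch != ' ')
-- cuts = [0] + [i for i, ch in enumerate(s) if ch.isalpha()] + [len(s)]
-- tokens = [s[a:b] for a, b in zip(cuts, cuts[1:])]   (cuts[1:] = tail)
-- tokens[-1]: tokens is nonempty since cuts has at least two entries; getLastD is exact here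
def get_sv_list_alt (Log : Option String) (lines_sv : List String) : List String :=
  let s : List Char := (PySem.Chars.join [] (lines_sv.map String.toList)).filter (fun ch => ch != ' ')
  let cuts : List Int :=
    [0] ++ ((PySem.List.enumerate s).filterMap
              (fun p => if PySem.Chars.isalpha p.2 then some p.1 else none)) ++ [(s.length : Int)]
  let tokens : List (List Char) :=
    (cuts.zip cuts.tail).map (fun p => PySem.List.slice s (some p.1) (some p.2))
  ((tokens.dropLast.filter (fun t => t.length == 3)) ++ [tokens.getLastD []]).map String.ofList

-- ===== PRECONDITION & SPEC =====
def Spec_get_sv_list (Log : Option String) (lines_sv : List String) (out : List String) : Prop := out = get_sv_list_alt Log lines_sv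
instance (Log : Option String) (lines_sv : List String) (out : List String) : Decidable (Spec_get_sv_list Log lines_sv out) := by unfold Spec_get_sv_list; infer_instance

-- ===== CLAIM (what is proved, stated in full; the proofs are below) =====
def Claim_equal_get_sv_list : Prop := ∀ (Log : Option String) (lines_sv : List String), Dom_get_sv_list Log lines_sv → Spec_get_sv_list Log lines_sv (get_sv_list Log lines_sv)

-- ===== LEMMAS AND PROOFS =====

-- ''.join of parts is concatenation
theorem pv_join_nil (ls : List (List Char)) : PySem.Chars.join [] ls = ls.flatten := by
  unfold PySem.Chars.join List.intercalate
  induction ls with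
  | nil => rfl
  | cons h t ih => cases t <;> simp_all [List.intersperse]

-- flatten of splitOn.go: the accumulator form
theorem pv_flatten_splitOn_go (fuel : Nat) :
    ∀ (l cur : List Char) (acc : List (List Char)), l.length ≤ fuel →
    (PySem.Chars.splitOn.go [' '] fuel l cur acc).flatten
      = acc.reverse.flatten ++ cur.reverse ++ l.filter (fun c => c != ' ') := by
  induction fuel with
  | zero =>
    intro l cur acc h
    have : l = [] := List.eq_nil_of_length_eq_zero (Nat.le_zero.mp h)
    subst this
    simp [PySem.Chars.splitOn.go]
  | succ n ih =>
    intro l cur acc h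
    cases l with
    | nil => simp [PySem.Chars.splitOn.go]
    | cons c t =>
      by_cases hc : c = ' '
      · subst hc
        have hp : List.isPrefixOf [' '] (' ' :: t) = true := by simp [List.isPrefixOf]
        simp only [PySem.Chars.splitOn.go, hp, if_pos]
        have hd : List.drop [' '].length (' ' :: t) = t := rfl
        rw [hd, ih t [] (cur.reverse :: acc) (by simpa using Nat.le_of_succ_le_succ h)]
        simp [List.filter]
      · have hp : List.isPrefixOf [' '] (c :: t) = false := by
          simp [List.isPrefixOf]; exact fun h' => hc h'.symm
        simp only [PySem.Chars.splitOn.go, hp, Bool.false_eq_true, if_false]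
        rw [ih t (c :: cur) acc (by simpa using Nat.le_of_succ_le_succ h)]
        have hb : (c != ' ') = true := by simp [hc]
        simp [List.filter, hb]

-- A's `''.join(filter(None, s.split(' ')))` removes exactly the spaces
theorem pv_lines_eq_filter (cs : List Char) :
    PySem.Chars.join [] ((PySem.Chars.splitOn cs [' ']).filter (fun p => !p.isEmpty))
      = cs.filter (fun c => c != ' ') := by
  rw [pv_join_nil, List.flatten_filter_not_isEmpty]
  unfold PySem.Chars.splitOn
  rw [pv_flatten_splitOn_go (cs.length + 1) cs [] [] (Nat.le_succ _)]
  simp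

-- the reference token stream: a new token starts at each alphabetic character,
-- the leading token is the (possibly empty) non-alpha prefix
def pvT : List Char → List (List Char)
  | [] => [[]]
  | c :: cs =>
      if PySem.Chars.isalpha c then [] :: (c :: (pvT cs).headD []) :: (pvT cs).tail
      else (c :: (pvT cs).headD []) :: (pvT cs).tail

theorem pvT_ne_nil (cs : List Char) : pvT cs ≠ [] := by
  cases cs with
  | nil => simp [pvT]
  | cons c t => simp only [pvT]; split <;> simp

-- A's loop state: partial token sv in front of the rest of the stream
def pvTc : List Char → List Char → List (List Char)
  | sv, [] => [sv]
  | sv, c :: cs => if PySem.Chars.isalpha c then sv :: pvTc [c] cs else pvTc (sv ++ [c]) cs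

theorem pvTc_ne_nil (cs : List Char) : ∀ sv, pvTc sv cs ≠ [] := by
  induction cs with
  | nil => intro sv; simp [pvTc]
  | cons c t ih => intro sv; by_cases h : PySem.Chars.isalpha c = true <;> simp [pvTc, h, ih]

theorem pvTc_eq (cs : List Char) : ∀ sv, pvTc sv cs = (sv ++ (pvT cs).headD []) :: (pvT cs).tail := by
  induction cs with
  | nil => intro sv; simp [pvTc, pvT]
  | cons c t ih =>
    intro sv
    by_cases h : PySem.Chars.isalpha c = true
    · simp only [pvTc, pvT, h, if_pos]
      rw [ih [c]]
      simp
    · simp only [pvTc, pvT, h, Bool.false_eq_true, if_false]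
      rw [ih (sv ++ [c])]
      simp

-- A's fold computes the last token and the length-3 tokens before it
theorem pv_foldA (cs : List Char) : ∀ (sv : List Char) (acc : List (List Char)),
    cs.foldl (fun st char =>
      if PySem.Chars.isalpha char then
        (([char] : List Char), if st.1.length == 3 then st.2 ++ [st.1] else st.2)
      else
        (st.1 ++ [char], st.2)) (sv, acc)
    = ((pvTc sv cs).getLastD [],
       acc ++ ((pvTc sv cs).dropLast.filter (fun t => t.length == 3))) := by
  induction cs with
  | nil => intro sv acc; simp [pvTc]
  | cons c t ih =>
    intro sv acc
    by_cases h : PySem.Chars.isalpha c = true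
    · simp only [List.foldl_cons, h, if_pos, pvTc]
      rw [ih [c] (if sv.length == 3 then acc ++ [sv] else acc)]
      obtain ⟨x, xs, hx⟩ := List.exists_cons_of_ne_nil (pvTc_ne_nil t [c])
      rw [hx]
      simp only [Prod.mk.injEq]
      refine ⟨by simp, ?_⟩
      rw [show (sv :: x :: xs).dropLast = sv :: (x :: xs).dropLast from rfl]
      simp only [List.filter_cons]
      split <;> simp
    · simp only [List.foldl_cons, h, Bool.false_eq_true, if_false, pvTc]
      exact ih (sv ++ [c]) acc
  
theorem pvTc_nil_eq_pvT (cs : List Char) : pvTc [] cs = pvT cs := by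
  rw [pvTc_eq cs []]
  obtain ⟨x, xs, hx⟩ := List.exists_cons_of_ne_nil (pvT_ne_nil cs)
  simp [hx]

-- B side: the nat cut positions
def pvPos : List Char → List Nat
  | [] => []
  | c :: cs => (if PySem.Chars.isalpha c then [0] else []) ++ (pvPos cs).map (· + 1)

theorem pv_enum (cs : List Char) : ∀ s0 : Int,
    (PySem.List.enumerate cs s0).filterMap
        (fun p => if PySem.Chars.isalpha p.2 then some p.1 else none)
      = (pvPos cs).map (fun n : Nat => s0 + (n : Int)) := by
  induction cs with
  | nil => intro s0; simp [PySem.List.enumerate_nil, pvPos]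
  | cons c t ih =>
    intro s0
    rw [PySem.List.enumerate_cons, List.filterMap_cons, pvPos]
    by_cases h : PySem.Chars.isalpha c = true
    · simp only [h, if_pos, ih (s0 + 1), List.map_map, List.map_cons,
        List.cons_append, List.nil_append]
      congr 1
      · norm_num
      · apply List.map_congr_left
        intro n _
        simp only [Function.comp_apply]
        push_cast
        ring
    · simp only [h, Bool.false_eq_true, if_false, ih (s0 + 1), List.map_map, List.nil_append]
      apply List.map_congr_left
      intro n _
      simp only [Function.comp_apply]
      push_cast
      ring

-- the slice between two nat cuts
def pvSlN (cs : List Char) (p : Nat × Nat) : List Char := (cs.drop p.1).take (p.2 - p.1)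

theorem pv_shift (c : Char) (cs : List Char) (L : List Nat) :
    (((L.map (· + 1)).zip (L.map (· + 1)).tail).map (pvSlN (c :: cs)))
      = (L.zip L.tail).map (pvSlN cs) := by
  rw [show (L.map (· + 1)).tail = L.tail.map (· + 1) by cases L <;> simp]
  rw [List.zip_map, List.map_map]
  apply List.map_congr_left
  intro p _
  simp [pvSlN, Nat.succ_sub_succ]

theorem pv_tokN (cs : List Char) :
    (((0 :: (pvPos cs ++ [cs.length])).zip (pvPos cs ++ [cs.length])).map (pvSlN cs))
      = pvT cs := by
  induction cs with
  | nil => simp [pvPos, pvT, pvSlN]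
  | cons c t ih =>
    have hsplit : pvPos (c :: t) ++ [(c :: t).length]
        = (if PySem.Chars.isalpha c then [0] else []) ++ (pvPos t ++ [t.length]).map (· + 1) := by
      simp [pvPos]
    cases hL : pvPos t ++ [t.length] with
    | nil => exact absurd hL (by simp)
    | cons l L' =>
      rw [hL] at hsplit ih
      have hs := pv_shift c t (l :: L')
      simp only [List.map_cons, List.tail_cons] at hs
      by_cases h : PySem.Chars.isalpha c = true
      · simp only [hsplit, h, if_pos, List.cons_append, List.nil_append, List.map_cons,
          List.zip_cons_cons, List.map_cons, hs]
        rw [show pvT (c :: t)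
              = [] :: (c :: (pvT t).headD []) :: (pvT t).tail by simp [pvT, h]]
        rw [← ih]
        simp only [List.zip_cons_cons, List.map_cons, List.headD_cons, List.tail_cons]
        simp [pvSlN]
      · simp only [hsplit, h, Bool.false_eq_true, if_false, List.nil_append, List.map_cons,
          List.zip_cons_cons, List.map_cons, hs]
        rw [show pvT (c :: t)
              = (c :: (pvT t).headD []) :: (pvT t).tail by simp [pvT, h]]
        rw [← ih]
        simp only [List.zip_cons_cons, List.map_cons, List.headD_cons, List.tail_cons]
        simp [pvSlN]

theorem pv_B_tokens (s : List Char) :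
    (([(0 : Int)] ++ ((PySem.List.enumerate s).filterMap
          (fun p => if PySem.Chars.isalpha p.2 then some p.1 else none)) ++ [(s.length : Int)]).zip
      ([(0 : Int)] ++ ((PySem.List.enumerate s).filterMap
          (fun p => if PySem.Chars.isalpha p.2 then some p.1 else none)) ++ [(s.length : Int)]).tail).map
        (fun p => PySem.List.slice s (some p.1) (some p.2)) = pvT s := by
  rw [pv_enum s 0]
  have hcuts : ([(0 : Int)] ++ (pvPos s).map (fun n : Nat => (0 : Int) + (n : Int)) ++ [(s.length : Int)])
      = ((0 :: (pvPos s ++ [s.length])).map (fun n : Nat => (n : Int))) := by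
    simp
  rw [hcuts]
  rw [show ((0 :: (pvPos s ++ [s.length])).map (fun n : Nat => (n : Int))).tail
      = ((0 :: (pvPos s ++ [s.length])).tail).map (fun n : Nat => (n : Int)) by simp]
  rw [List.zip_map, List.map_map]
  have hfun : ((fun p : Int × Int => PySem.List.slice s (some p.1) (some p.2)) ∘
        Prod.map (fun n : Nat => (n : Int)) (fun n : Nat => (n : Int))) = pvSlN s := by
    funext p
    simp [Function.comp, PySem.List.slice_natCast, pvSlN]
  rw [hfun, List.tail_cons]
  exact pv_tokN s

-- ===== VERDICT (by name: the statement is the Claim_ definition above) =====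
theorem get_sv_list_spec : Claim_equal_get_sv_list := by
  intro Log lines_sv _
  simp only [Spec_get_sv_list, get_sv_list, get_sv_list_alt]
  rw [pv_lines_eq_filter]
  rw [pv_B_tokens]
  rw [pv_foldA _ [] []]
  rw [pvTc_nil_eq_pvT]
  simp
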